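-- pv_equiv track=rewrite | github.com/Aurora-Program/Trinity-3 | Test/fullTest.py | paridad_alterna
-- ===== SOURCE A (Python) =====
-- def paridad_alterna(subv):
--     # Paridad alterna: XOR de los bits en posiciones pares menos XOR de impares
--     pares = [subv[i] for i in range(len(subv)) if i % 2 == 0]
--     impares = [subv[i] for i in range(len(subv)) if i % 2 == 1]
--     xor_pares = 0
--     for b in pares:
--         xor_pares ^= b
--     xor_impares = 0
--     for b in impares:
--         xor_impares ^= b
--     return (xor_pares ^ xor_impares)
-- ===== SOURCE B (Python) =====
-- from functools import reduce
-- from operator import xor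
--
-- def paridad_alterna(subv):
--     # XOR is associative and commutative, so the even/odd split is unnecessary:
--     # one linear XOR over all elements gives the same value.
--     return reduce(xor, subv, 0)
-- ===== Notes on version B (the rewrite author's own statement) =====
-- stated objective: simpler
-- what changed: Dropped the even/odd index partitioning (two range-filter comprehensions plus two XOR loops) and replaced it with a single reduce(xor, subv, 0) over all elements, exact because XOR is commutative and associative.
import Mathlib
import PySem

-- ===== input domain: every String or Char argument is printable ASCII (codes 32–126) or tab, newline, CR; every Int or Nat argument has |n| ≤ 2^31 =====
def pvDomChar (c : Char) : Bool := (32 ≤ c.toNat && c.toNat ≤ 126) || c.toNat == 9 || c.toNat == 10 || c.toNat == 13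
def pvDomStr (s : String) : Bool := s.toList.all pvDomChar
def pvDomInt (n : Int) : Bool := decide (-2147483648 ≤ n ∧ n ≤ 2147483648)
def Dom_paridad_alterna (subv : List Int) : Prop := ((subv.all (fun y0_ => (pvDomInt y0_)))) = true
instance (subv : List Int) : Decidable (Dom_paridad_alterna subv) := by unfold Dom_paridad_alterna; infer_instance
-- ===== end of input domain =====

-- B replaces A's even/odd index partitioning by a single XOR pass over the list (simpler; XOR is commutative and associative).

-- ===== PORT A =====
def paridad_alterna (subv : List Int) : Int :=
  let pares : List Int :=
    ((PySem.List.pyRange 0 (subv.length : Int) 1).filter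
      (fun i => PySem.Int.mod i 2 == 0)).map (fun i => PySem.List.pyGetD subv i 0)
  let impares : List Int :=
    ((PySem.List.pyRange 0 (subv.length : Int) 1).filter
      (fun i => PySem.Int.mod i 2 == 1)).map (fun i => PySem.List.pyGetD subv i 0)
  let xor_pares : Int := pares.foldl (fun acc b => PySem.Int.bxor acc b) 0
  let xor_impares : Int := impares.foldl (fun acc b => PySem.Int.bxor acc b) 0
  PySem.Int.bxor xor_pares xor_impares

-- ===== PORT B =====
def paridad_alterna_alt (subv : List Int) : Int :=
  subv.foldl (fun acc b => PySem.Int.bxor acc b) 0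

-- ===== PRECONDITION & SPEC =====
def Spec_paridad_alterna (subv : List Int) (out : Int) : Prop := out = paridad_alterna_alt subv
instance (subv : List Int) (out : Int) : Decidable (Spec_paridad_alterna subv out) := by unfold Spec_paridad_alterna; infer_instance

-- ===== CLAIM (what is proved, stated in full; the proofs are below) =====
def Claim_equal_paridad_alterna : Prop := ∀ (subv : List Int), Dom_paridad_alterna subv → Spec_paridad_alterna subv (paridad_alterna subv)

-- ===== LEMMAS AND PROOFS =====

theorem pvBxorEqXor (a b : Int) : PySem.Int.bxor a b = Int.xor a b := by
  unfold PySem.Int.bxor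
  match a, b with
  | Int.ofNat m, Int.ofNat n => simp [Int.xor]
  | Int.ofNat m, Int.negSucc n => simp [Int.xor, Int.negSucc_eq]; omega
  | Int.negSucc m, Int.ofNat n => simp [Int.xor, Int.negSucc_eq]; omega
  | Int.negSucc m, Int.negSucc n => simp [Int.xor, Int.negSucc_eq]; omega

theorem pvIxorAssoc (a b c : Int) : Int.xor (Int.xor a b) c = Int.xor a (Int.xor b c) := by
  match a, b, c with
  | Int.ofNat m, Int.ofNat n, Int.ofNat p => simp [Int.xor, Nat.xor_assoc]
  | Int.ofNat m, Int.ofNat n, Int.negSucc p => simp [Int.xor, Nat.xor_assoc]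
  | Int.ofNat m, Int.negSucc n, Int.ofNat p => simp [Int.xor, Nat.xor_assoc]
  | Int.ofNat m, Int.negSucc n, Int.negSucc p => simp [Int.xor, Nat.xor_assoc]
  | Int.negSucc m, Int.ofNat n, Int.ofNat p => simp [Int.xor, Nat.xor_assoc]
  | Int.negSucc m, Int.ofNat n, Int.negSucc p => simp [Int.xor, Nat.xor_assoc]
  | Int.negSucc m, Int.negSucc n, Int.ofNat p => simp [Int.xor, Nat.xor_assoc]
  | Int.negSucc m, Int.negSucc n, Int.negSucc p => simp [Int.xor, Nat.xor_assoc]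

theorem pvBxorAssoc (a b c : Int) :
    PySem.Int.bxor (PySem.Int.bxor a b) c = PySem.Int.bxor a (PySem.Int.bxor b c) := by
  simp only [pvBxorEqXor]; exact pvIxorAssoc a b c

theorem pvZeroBxor (a : Int) : PySem.Int.bxor 0 a = a := by
  rw [PySem.Int.bxor_comm]; exact PySem.Int.bxor_zero a

-- a foldl over bxor peels its accumulator off
theorem pvFoldlBxor (l : List Int) (a : Int) :
    l.foldl (fun acc b => PySem.Int.bxor acc b) a
      = PySem.Int.bxor a (l.foldl (fun acc b => PySem.Int.bxor acc b) 0) := by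
  induction l generalizing a with
  | nil => simp [PySem.Int.bxor_zero]
  | cons x t ih =>
    simp only [List.foldl_cons]
    rw [ih (PySem.Int.bxor a x), ih (PySem.Int.bxor 0 x), pvZeroBxor, pvBxorAssoc]

-- the index-comprehension A builds, restated over a ℕ-range with plain list indexing
theorem pvParesEq (subv : List Int) (ri : Int) (r : Nat) (hri : ri = (r : Int)) :
    ((PySem.List.pyRange 0 (subv.length : Int) 1).filter
      (fun i => PySem.Int.mod i 2 == ri)).map (fun i => PySem.List.pyGetD subv i 0)
    = ((List.range subv.length).filter (fun k => k % 2 == r)).map (fun k => subv.getD k 0) := by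
  subst hri
  rw [PySem.List.pyRange_one]
  simp only [Int.sub_zero, Int.toNat_natCast, List.filter_map, List.map_map]
  have hf : (List.range subv.length).filter
        ((fun i => PySem.Int.mod i 2 == (r : Int)) ∘ fun k : Nat => 0 + (k : Int))
      = (List.range subv.length).filter (fun k => k % 2 == r) := by
    apply List.filter_congr
    intro k _
    simp only [Function.comp_apply, Int.zero_add]
    rw [show ((2:Int)) = ((2:Nat):Int) from rfl, PySem.Int.mod_natCast]
    simp
    omega
  rw [hf]
  apply List.map_congr_left
  intro k _
  simp [PySem.List.pyGetD_natCast]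

-- prepending two elements shifts the parity comprehension by one head each
theorem pvShift (x y : Int) (t : List Int) (r : Nat) (hr : r = 0 ∨ r = 1) :
    ((List.range (x :: y :: t).length).filter (fun k => k % 2 == r)).map
        (fun k => (x :: y :: t).getD k 0)
    = (if r = 0 then x else y) ::
        ((List.range t.length).filter (fun k => k % 2 == r)).map (fun k => t.getD k 0) := by
  have h2 : List.range (t.length + 2) = 0 :: 1 :: (List.range t.length).map (· + 2) := by
    rw [List.range_succ_eq_map, List.range_succ_eq_map]
    simp [List.map_map, Function.comp]
  have hlen : (x :: y :: t).length = t.length + 2 := by simp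
  rw [hlen, h2]
  have hfc : (List.range t.length).filter ((fun k => k % 2 == r) ∘ (· + 2))
      = (List.range t.length).filter (fun k => k % 2 == r) := by
    apply List.filter_congr
    intro k _
    simp [Nat.add_mod_right]
  have hget : ∀ k ∈ (List.range t.length).filter (fun k => k % 2 == r),
      (x :: y :: t).getD (k + 2) 0 = t.getD k 0 := by
    intro k _; simp [List.getD]
  rcases hr with rfl | rfl <;>
  · simp only [List.filter_cons, List.filter_map]
    norm_num
    rw [hfc]
    exact List.map_congr_left hget

-- the parity split of XOR recombines into one pass (two-step structural induction)
theorem pvSplitBxor : ∀ (subv : List Int),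
    PySem.Int.bxor
      ((((List.range subv.length).filter (fun k => k % 2 == 0)).map (fun k => subv.getD k 0)).foldl
        (fun acc b => PySem.Int.bxor acc b) 0)
      ((((List.range subv.length).filter (fun k => k % 2 == 1)).map (fun k => subv.getD k 0)).foldl
        (fun acc b => PySem.Int.bxor acc b) 0)
    = subv.foldl (fun acc b => PySem.Int.bxor acc b) 0
  | [] => by
    simp only [List.length_nil, List.range_zero, List.filter_nil, List.map_nil, List.foldl_nil]
    exact PySem.Int.bxor_zero 0
  | [x] => by
    simp only [List.length_cons, List.length_nil, Nat.zero_add, List.range_one]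
    simp [pvZeroBxor, PySem.Int.bxor_zero]
  | x :: y :: t => by
    rw [pvShift x y t 0 (Or.inl rfl), pvShift x y t 1 (Or.inr rfl)]
    simp only [reduceIte, one_ne_zero, List.foldl_cons]
    rw [pvFoldlBxor _ (PySem.Int.bxor 0 x), pvFoldlBxor _ (PySem.Int.bxor 0 y),
        pvFoldlBxor t (PySem.Int.bxor (PySem.Int.bxor 0 x) y), pvZeroBxor, pvZeroBxor]
    have ht := pvSplitBxor t
    set e := (((List.range t.length).filter (fun k => k % 2 == 0)).map (fun k => t.getD k 0)).foldl
        (fun acc b => PySem.Int.bxor acc b) 0 with he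
    set o := (((List.range t.length).filter (fun k => k % 2 == 1)).map (fun k => t.getD k 0)).foldl
        (fun acc b => PySem.Int.bxor acc b) 0 with ho
    rw [← ht]
    rw [pvBxorAssoc x e (PySem.Int.bxor y o), ← pvBxorAssoc e y o,
        PySem.Int.bxor_comm e y, pvBxorAssoc y e o, ← pvBxorAssoc x y (PySem.Int.bxor e o)]

-- ===== VERDICT (by name: the statement is the Claim_ definition above) =====
theorem paridad_alterna_spec : Claim_equal_paridad_alterna := by
  intro subv _
  unfold Spec_paridad_alterna
  simp only [paridad_alterna, paridad_alterna_alt]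
  rw [pvParesEq subv 0 0 (by norm_num), pvParesEq subv 1 1 (by norm_num)]
  exact pvSplitBxor subv
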